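-- pv_equiv track=rewrite | github.com/HeeJeongOh/algorithm | programmers/p135808.py | solution
-- ===== SOURCE A (Python) =====
-- def solution(k, m, score):
--     score.sort(reverse = True)
--     box = []
--     for i in range(0, len(score), m):
--         # slicing 하면 나머지 모두 추가 -> 3개만 있으도 3개 추가
--         tmp = score[i:i+m]
--         if len(tmp) == m:
--             box.append(tmp)
--     return sum(min(b)*m for b in box)
-- ===== SOURCE B (Python) =====
-- def solution(k, m, score):
--     # One ascending sort, then pick every m-th element from index n%m:
--     # these are exactly the minima of the full m-sized groups of the
--     # descending order.  (Unlike A, this does not mutate `score`.)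
--     s = sorted(score)
--     n = len(s)
--     return sum(s[j] * m for j in range(n % m, n, m))
-- ===== Notes on version B (the rewrite author's own statement) =====
-- stated objective: simpler
-- what changed: Instead of sorting descending, materialising every m-sized group by slicing and scanning each group for its minimum, B sorts once ascending and directly sums score_sorted[j]*m for j = n%m, n%m+m, ..., which are exactly the group minima; no group lists and no min scans are built (A also mutates `score` in place, B does not).
import Mathlib
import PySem

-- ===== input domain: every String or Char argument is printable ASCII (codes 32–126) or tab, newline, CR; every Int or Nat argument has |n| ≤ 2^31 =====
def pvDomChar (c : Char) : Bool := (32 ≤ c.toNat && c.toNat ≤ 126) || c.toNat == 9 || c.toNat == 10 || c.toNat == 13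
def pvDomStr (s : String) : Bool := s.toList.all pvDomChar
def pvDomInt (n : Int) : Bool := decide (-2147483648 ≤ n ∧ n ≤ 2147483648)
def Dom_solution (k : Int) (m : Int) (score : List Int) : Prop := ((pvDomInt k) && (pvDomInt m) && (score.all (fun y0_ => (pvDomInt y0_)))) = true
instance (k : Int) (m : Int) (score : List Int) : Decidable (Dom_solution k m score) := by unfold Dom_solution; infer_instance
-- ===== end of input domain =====

-- B replaces A's descending sort + group slicing + per-group min scans by one ascending
-- sort and a direct stride-m index sum (equivalence is about the RETURN value: A sorts
-- `score` in place, B does not mutate it).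

-- ===== PORT A =====
def solution (k : Int) (m : Int) (score : List Int) : Int :=
  let s := PySem.List.sorted score (fun x => x) true
  let box := (PySem.List.pyRange 0 (s.length : Int) m).foldl
    (fun box i =>
      let tmp := PySem.List.slice s (some i) (some (i + m))
      if (tmp.length : Int) = m then box ++ [tmp] else box) ([] : List (List Int))
  box.foldl (fun acc b => acc + (PySem.List.min? b (fun x => x)).getD 0 * m) 0

-- ===== PORT B =====
def solution_alt (k : Int) (m : Int) (score : List Int) : Int :=
  let s := PySem.List.sorted score (fun x => x) false
  let n : Int := (s.length : Int)
  (PySem.List.pyRange (PySem.Int.mod n m) n m).foldl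
    (fun acc j => acc + (PySem.List.pyGet? s j).getD 0 * m) 0

-- ===== PRECONDITION & SPEC =====
-- Pre_ excludes only m = 0, where Python A raises ValueError (range step 0).
def Pre_solution (k : Int) (m : Int) (score : List Int) : Prop := m ≠ 0
instance (k : Int) (m : Int) (score : List Int) : Decidable (Pre_solution k m score) := by unfold Pre_solution; infer_instance
def pvWitness_solution : Int × Int × List Int := (5, 2, [1, 3, 2, 4, 5])

def Spec_solution (k : Int) (m : Int) (score : List Int) (out : Int) : Prop := out = solution_alt k m score
instance (k : Int) (m : Int) (score : List Int) (out : Int) : Decidable (Spec_solution k m score out) := by unfold Spec_solution; infer_instance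

-- ===== CLAIM (what is proved, stated in full; the proofs are below) =====
def Claim_equal_solution : Prop := ∀ (k : Int) (m : Int) (score : List Int), Dom_solution k m score → Pre_solution k m score → Spec_solution k m score (solution k m score)

-- ===== LEMMAS AND PROOFS =====

-- range with a negative step and start ≤ stop is empty
lemma pyRange_nil_of_neg {a b s : Int} (hs : s < 0) (hab : a ≤ b) :
    PySem.List.pyRange a b s = [] := by
  simp [PySem.List.pyRange, hs.ne, not_lt.mpr hs.le, not_lt.mpr hab]

-- sorted(xs, reverse=True) over Int is the reverse of sorted(xs)
lemma sorted_rev_eq_reverse (xs : List Int) :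
    PySem.List.sorted xs (fun x => x) true = (PySem.List.sorted xs (fun x => x) false).reverse := by
  apply List.eq_of_perm_of_sorted (le := fun a b : Int => b ≤ a)
  · intro a b _ _ h1 h2; omega
  · exact PySem.List.sorted_pairwise_rev xs (fun x => x)
  · exact (List.pairwise_reverse).mpr (PySem.List.sorted_pairwise xs (fun x => x))
  · exact (PySem.List.sorted_perm xs (fun x => x) true).trans
      ((List.reverse_perm _).trans (PySem.List.sorted_perm xs (fun x => x) false)).symm

-- the box-building loop is a filter + map
lemma foldl_box (m : Int) (r : List Int) (L : List Int) (acc : List (List Int)) :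
    L.foldl (fun box i =>
        if ((PySem.List.slice r (some i) (some (i + m))).length : Int) = m
        then box ++ [PySem.List.slice r (some i) (some (i + m))] else box) acc
    = acc ++ (L.filter (fun i => decide (((PySem.List.slice r (some i) (some (i + m))).length : Int) = m))).map
        (fun i => PySem.List.slice r (some i) (some (i + m))) := by
  induction L generalizing acc with
  | nil => simp
  | cons x L ih =>
    simp only [List.foldl_cons, List.filter_cons]
    by_cases h : ((PySem.List.slice r (some x) (some (x + m))).length : Int) = m
    · simp [h, ih]
    · simp [h, ih]

-- summing loop as list sum
lemma foldl_sum {α : Type} (g : α → Int) (l : List α) (c : Int) :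
    l.foldl (fun a b => a + g b) c = c + (l.map g).sum := by
  induction l generalizing c with
  | nil => simp
  | cons x l ih => simp [ih, add_assoc]

lemma sum_map_range (f : Nat → Int) (n : Nat) :
    ((List.range n).map f).sum = ∑ i ∈ Finset.range n, f i := by
  induction n with
  | zero => simp
  | succ n ih => simp [List.range_succ, Finset.sum_range_succ, ih]

lemma sum_map_filter {α : Type} (p : α → Bool) (f : α → Int) (l : List α) :
    ((l.filter p).map f).sum = (l.map (fun x => if p x then f x else 0)).sum := by
  induction l with
  | nil => simp
  | cons x l ih => by_cases h : p x <;> simp [h, ih]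

-- Python min of a list with an element that is a lower bound
lemma min?_eq_of_lb {g : List Int} {x : Int} (hx : x ∈ g) (hlb : ∀ y ∈ g, x ≤ y) :
    PySem.List.min? g (fun y => y) = some x := by
  cases h : PySem.List.min? g (fun y => y) with
  | none =>
    rw [PySem.List.min?_eq_none_iff] at h
    subst h; simp at hx
  | some mn =>
    have h1 := PySem.List.min?_mem h
    have h2 := PySem.List.min?_isMin h x hx
    have h3 := hlb mn h1
    have : mn = x := le_antisymm h2 h3
    rw [this]

-- the m-group of the descending list starting at a has min t[N-a-M]
lemma min_group (t : List Int) (ht : t.Pairwise (· ≤ ·)) (a M : Nat) (hM : 0 < M)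
    (h : a + M ≤ t.length) :
    PySem.List.min? ((t.reverse.drop a).take M) (fun y => y)
      = some (t.getD (t.length - a - M) 0) := by
  have hd : t.length - a - M < t.length := by omega
  have htmp : (t.reverse.drop a).take M = ((t.drop (t.length - a - M)).take M).reverse := by
    rw [List.drop_reverse, List.take_reverse, List.length_take, List.drop_take]
    have h1 : min (t.length - a) t.length = t.length - a := by omega
    rw [h1]
    have h2 : t.length - a - (t.length - a - M) = M := by omega
    rw [h2]
  have hdrop : t.drop (t.length - a - M) = t[t.length - a - M] :: t.drop (t.length - a - M + 1) :=
    List.drop_eq_getElem_cons hd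
  have hgetD : t.getD (t.length - a - M) 0 = t[t.length - a - M] := List.getD_eq_getElem t 0 hd
  have hcons : (t.drop (t.length - a - M)).take M
      = t[t.length - a - M] :: (t.drop (t.length - a - M + 1)).take (M - 1) := by
    cases M with
    | zero => omega
    | succ M' =>
      rw [List.drop_eq_getElem_cons hd, List.take_succ_cons, Nat.add_sub_cancel]
  apply min?_eq_of_lb
  · rw [htmp, List.mem_reverse, hcons, hgetD]
    exact List.mem_cons_self
  · intro y hy
    rw [htmp, List.mem_reverse] at hy
    have hy' : y ∈ t.drop (t.length - a - M) := List.mem_of_mem_take hy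
    rw [hdrop] at hy'
    rw [hgetD]
    rcases List.mem_cons.mp hy' with h1 | h1
    · omega
    · have hp := List.Pairwise.drop (i := t.length - a - M) ht
      rw [hdrop] at hp
      exact (List.pairwise_cons.mp hp).1 y h1

lemma slice_len_cond (r : List Int) (a M : Nat) (hM : 0 < M) :
    ((((PySem.List.slice r (some (a : Int)) (some ((a : Int) + (M : Int)))).length : Int) = (M : Int)))
      ↔ a + M ≤ r.length := by
  rw [PySem.List.slice_natCast_add]
  rw [List.length_take, List.length_drop]
  constructor
  · intro h
    have : min M (r.length - a) = M := by exact_mod_cast h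
    omega
  · intro h; congr 1; omega

lemma sum_ite_range (q q0 : Nat) (h : q ≤ q0) (f : Nat → Int) (c : Nat → Prop) [DecidablePred c]
    (hc : ∀ k < q0, c k ↔ k < q) :
    (∑ k ∈ Finset.range q0, if c k then f k else 0) = ∑ k ∈ Finset.range q, f k := by
  rw [← Finset.sum_subset (f := fun k => if c k then f k else 0)
      (Finset.range_subset_range.mpr h)]
  · apply Finset.sum_congr rfl
    intro x hx
    rw [Finset.mem_range] at hx
    rw [if_pos ((hc x (lt_of_lt_of_le hx h)).mpr hx)]
  · intro x hx hnx
    rw [Finset.mem_range] at hx hnx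
    rw [if_neg]
    intro hcx
    exact hnx ((hc x hx).mp hcx)

-- k < N/M  ↔  M*k + M ≤ N
lemma lt_div_iff_cond (M N kk : Nat) (hMpos : 0 < M) : M * kk + M ≤ N ↔ kk < N / M := by
  constructor
  · intro h
    by_contra hcon
    have h1 : N / M ≤ kk := by omega
    have h2 : M * (N / M) ≤ M * kk := Nat.mul_le_mul_left M h1
    have h3 : M * (N / M) + N % M = N := Nat.div_add_mod N M
    have h4 : N % M < M := Nat.mod_lt _ hMpos
    omega
  · intro h
    have h1 : kk + 1 ≤ N / M := h
    have h2 : M * (kk + 1) ≤ M * (N / M) := Nat.mul_le_mul_left M h1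
    have h3 : M * (N / M) + N % M = N := Nat.div_add_mod N M
    have h4 : M * (kk + 1) = M * kk + M := by ring
    omega

-- the main positive-step case
lemma main_pos (k m : Int) (score : List Int) (hm : 0 < m) :
    solution k m score = solution_alt k m score := by
  have hrev := sorted_rev_eq_reverse score
  set t := PySem.List.sorted score (fun x => x) false with htdef
  have ht : t.Pairwise (fun a b : Int => a ≤ b) := PySem.List.sorted_pairwise score (fun x => x)
  set M : Nat := m.toNat with hMdef
  have hMpos : 0 < M := by omega
  have hmM : m = (M : Int) := by omega
  set N : Nat := t.length with hNdef
  set q : Nat := N / M with hqdef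
  set r0 : Nat := N % M with hr0def
  have hNq : M * q + r0 = N := Nat.div_add_mod N M
  have hr0M : r0 < M := Nat.mod_lt _ hMpos
  clear_value t M N q r0
  -- A's value as a sum over the full-group indices
  have hA : solution k m score = ∑ x ∈ Finset.range q, t.getD (N - M * x - M) 0 * m := by
    simp only [solution]
    rw [hrev, List.length_reverse, ← hNdef]
    rw [foldl_box, List.nil_append,
        foldl_sum (fun b => (PySem.List.min? b (fun x => x)).getD 0 * m), zero_add,
        List.map_map, sum_map_filter, PySem.List.pyRange_of_pos 0 (N : Int) hm,
        List.map_map, sum_map_range]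
    refine Eq.trans (Finset.sum_congr rfl (fun x _ => ?_))
      (sum_ite_range q _ ?_ (fun x => t.getD (N - M * x - M) 0 * m)
        (fun kk => M * kk + M ≤ N) ?_)
    · -- pointwise rewrite of the summand
      simp only [Function.comp_apply, decide_eq_true_eq]
      have h0 : (0 : Int) + m * (x : Nat) = ((M * x : Nat) : Int) := by rw [hmM]; push_cast; ring
      rw [h0, hmM]
      by_cases hcond : M * x + M ≤ N
      · rw [if_pos, if_pos hcond]
        · rw [PySem.List.slice_natCast_add,
              min_group t ht (M * x) M hMpos (by omega)]
          rw [Option.getD_some, ← hNdef]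
        · rw [slice_len_cond t.reverse (M * x) M hMpos, List.length_reverse, ← hNdef]
          exact hcond
      · rw [if_neg, if_neg hcond]
        rw [slice_len_cond t.reverse (M * x) M hMpos, List.length_reverse, ← hNdef]
        exact hcond
    · -- q ≤ count
      by_cases hN0 : (0:Int) < (N:Int)
      · rw [if_pos hN0]
        have hc1 : ((N:Int) - 0 + m - 1) = (((N + M - 1 : Nat)) : Int) := by
          rw [hmM]; omega
        rw [hc1, hmM]
        have hc2 : (((N + M - 1 : Nat) : Int) / ((M : Nat) : Int)).toNat = (N + M - 1) / M := rfl
        rw [hc2, hqdef]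
        exact Nat.div_le_div_right (by omega)
      · rw [if_neg hN0]
        have hN : N = 0 := by omega
        rw [hqdef, hN]
        simp
    · intro kk _
      rw [hqdef]
      exact lt_div_iff_cond M N kk hMpos
  -- B's value as a sum over the stride positions
  have hB : solution_alt k m score = ∑ x ∈ Finset.range q, t.getD (r0 + M * x) 0 * m := by
    simp only [solution_alt]
    rw [← htdef, ← hNdef, PySem.Int.mod_eq_emod_of_pos hm]
    have hcast : ((N : Nat) : Int) % m = ((r0 : Nat) : Int) := by
      rw [hmM, hr0def]; exact (Int.natCast_mod N M).symm
    rw [hcast, PySem.List.pyRange_of_pos _ _ hm,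
        foldl_sum (fun j => (PySem.List.pyGet? t j).getD 0 * m), zero_add, List.map_map,
        sum_map_range]
    have hcB : (if ((r0 : Nat) : Int) < ((N : Nat) : Int)
        then ((((N : Nat) : Int) - ((r0 : Nat) : Int) + m - 1) / m).toNat else 0) = q := by
      by_cases hlt : ((r0 : Nat) : Int) < ((N : Nat) : Int)
      · rw [if_pos hlt]
        have h1 : (((N : Nat) : Int) - ((r0 : Nat) : Int) + m - 1) = ((M * q + (M - 1) : Nat) : Int) := by
          rw [hmM]
          have e : M * q + (M - 1) = (M * q) + M - 1 := by omega
          rw [e]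
          omega
        rw [h1, hmM]
        have h2 : ((((M * q + (M - 1) : Nat)) : Int) / ((M : Nat) : Int)).toNat
            = (M * q + (M - 1)) / M := rfl
        rw [h2, Nat.mul_add_div hMpos, Nat.div_eq_of_lt (by omega)]
        omega
      · rw [if_neg hlt]
        have hle : N ≤ r0 := by omega
        have hq0 : q = 0 := by
          by_contra hq
          have h1 : 1 ≤ q := by omega
          have h2 : M * 1 ≤ M * q := Nat.mul_le_mul_left M h1
          have h3 : M * 1 = M := by ring
          omega
        omega
    rw [hcB]
    apply Finset.sum_congr rfl
    intro x _
    simp only [Function.comp_apply]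
    have hidx : (((r0 : Nat) : Int) + m * (x : Nat)) = ((r0 + M * x : Nat) : Int) := by
      rw [hmM]; push_cast; ring
    rw [hidx, PySem.List.pyGet?_natCast, ← List.getD_eq_getElem?_getD]
  rw [hA, hB, ← Finset.sum_range_reflect (fun x => t.getD (N - M * x - M) 0 * m) q]
  apply Finset.sum_congr rfl
  intro j hj
  rw [Finset.mem_range] at hj
  have e1 : M * (q - 1 - j) + (M * j + M) = M * q := by
    have e2 : (q - 1 - j) + (j + 1) = q := by omega
    calc M * (q - 1 - j) + (M * j + M) = M * ((q - 1 - j) + (j + 1)) := by ring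
      _ = M * q := by rw [e2]
  have e3 : N - M * (q - 1 - j) - M = r0 + M * j := by omega
  rw [e3]

-- ===== VERDICT (by name: the statement is the Claim_ definition above) =====
theorem solution_spec : Claim_equal_solution := by
  intro k m score _ hm
  unfold Spec_solution
  rcases lt_or_gt_of_ne hm with hneg | hpos
  · -- m < 0 : both ranges are empty, both sums are 0
    have h1 : PySem.List.pyRange 0 ((score.length : Nat) : Int) m = [] :=
      pyRange_nil_of_neg hneg (Int.natCast_nonneg _)
    have h2 : PySem.List.pyRange (PySem.Int.mod ((score.length : Nat) : Int) m)
        ((score.length : Nat) : Int) m = [] := by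
      refine pyRange_nil_of_neg hneg ?_
      have := (PySem.Int.mod_neg_bounds (a := ((score.length : Nat) : Int)) hneg).2
      have h0 : (0:Int) ≤ ((score.length : Nat) : Int) := Int.natCast_nonneg _
      omega
    simp [solution, solution_alt, h1, h2]
  · exact main_pos k m score hpos
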